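-- pv_equiv track=rewrite | github.com/qpython-android/developer.qpython.org | source/qsl4a/sl4aHelp.py | Text2Html
-- ===== SOURCE A (Python) =====
-- def Text2Html(s,u=None):
--     t=['<font color=#007f00>']
--     r=t.append
--     firstLine=True
--     for i in s:
--         j=ord(i)
--         if j==10:
--             if firstLine:
--                 if len(t)==1:
--                     continue
--                 r('</font>')
--                 firstLine=False
--             r('<br><br>')
--         elif j==32:
--             r('&nbsp;')
--         elif j<256 and not (i.isalpha() or i.isdigit()):
--             r('&#');r(str(j));r(";")
--         else:
--             r(i)
--     t=''.join(t)
--     if u: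
--         t=t.replace(u,"<b>"+u+"</b>")
--     return t
-- ===== SOURCE B (Python) =====
-- def Text2Html(s, u=None):
--     def esc_char(ch):
--         o = ord(ch)
--         if o == 32:
--             return '&nbsp;'
--         if o < 256 and not (ch.isalpha() or ch.isdigit()):
--             return '&#' + str(o) + ';'
--         return ch
--
--     def esc_line(line):
--         return ''.join(esc_char(ch) for ch in line)
--
--     lines = s.split('\n')
--     k = 0
--     while k < len(lines) and lines[k] == '':
--         k += 1
--     t = '<font color=#007f00>'
--     if k < len(lines):
--         t += esc_line(lines[k])
--         rest = lines[k + 1:]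
--         if rest:
--             t += '</font>'
--             for line in rest:
--                 t += '<br><br>' + esc_line(line)
--     if u:
--         t = t.replace(u, '<b>' + u + '</b>')
--     return t
-- ===== Notes on version B (the rewrite author's own statement) =====
-- stated objective: alternative
-- what changed: B splits the input into lines at newline characters and assembles the HTML line-by-line (skip leading empty lines, escape the first non-empty line, then close the font tag and append each further escaped line after a double break), replacing A's per-character state machine with a firstLine flag and a len(t)==1 test.
import Mathlib
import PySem

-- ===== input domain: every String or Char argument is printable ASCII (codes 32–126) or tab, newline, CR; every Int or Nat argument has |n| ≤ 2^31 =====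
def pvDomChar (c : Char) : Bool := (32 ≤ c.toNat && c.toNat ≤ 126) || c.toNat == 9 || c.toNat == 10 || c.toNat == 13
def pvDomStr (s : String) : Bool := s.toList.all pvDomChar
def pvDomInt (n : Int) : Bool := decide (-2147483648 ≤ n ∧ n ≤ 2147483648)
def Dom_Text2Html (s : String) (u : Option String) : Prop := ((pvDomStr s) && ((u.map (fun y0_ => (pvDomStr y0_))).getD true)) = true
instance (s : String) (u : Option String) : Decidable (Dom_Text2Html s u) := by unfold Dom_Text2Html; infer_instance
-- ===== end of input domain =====

-- B rebuilds the HTML line-by-line from s.split('\n') instead of A's per-character state machine; objective: alternative decomposition, same cost.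

-- ===== PORT A =====
-- one loop step of A's for-loop: state = (the list t of appended pieces, firstLine)
def pvStepA (st : List (List Char) × Bool) (c : Char) : List (List Char) × Bool :=
  let j := c.toNat
  if j = 10 then
    if st.2 = true then
      if st.1.length = 1 then st
      else (st.1 ++ ["</font>".toList, "<br><br>".toList], false)
    else (st.1 ++ ["<br><br>".toList], st.2)
  else if j = 32 then (st.1 ++ ["&nbsp;".toList], st.2)
  else if j < 256 ∧ ¬(PySem.Chars.isalpha c = true ∨ PySem.Chars.isdigit c = true) then
    (st.1 ++ ["&#".toList, PySem.Int.toChars (j : Int), ";".toList], st.2)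
  else (st.1 ++ [[c]], st.2)

def Text2Html (s : String) (u : Option String) : String :=
  let t := (s.toList.foldl pvStepA (["<font color=#007f00>".toList], true)).1
  let tj := t.flatten
  let tj2 := match u with
    | some us => if us.toList ≠ [] then PySem.Chars.replace tj us.toList ("<b>".toList ++ us.toList ++ "</b>".toList) else tj
    | none => tj
  String.ofList tj2

-- ===== PORT B =====
def pvEscChar (c : Char) : List Char :=
  let j := c.toNat
  if j = 32 then "&nbsp;".toList
  else if j < 256 ∧ ¬(PySem.Chars.isalpha c = true ∨ PySem.Chars.isdigit c = true) then
    "&#".toList ++ PySem.Int.toChars (j : Int) ++ ";".toList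
  else [c]

def pvEscLine (l : List Char) : List Char := (l.map pvEscChar).flatten

-- port of Source B's s.split('\n') (single-character separator)
def pvSplitNl : List Char → List (List Char)
  | [] => [[]]
  | c :: cs =>
    if c = '\n' then [] :: pvSplitNl cs
    else match pvSplitNl cs with
      | [] => [[c]]
      | l :: ls => (c :: l) :: ls

def Text2Html_alt (s : String) (u : Option String) : String :=
  let lines := pvSplitNl s.toList
  let t := match lines.dropWhile (fun l => l == []) with
    | [] => "<font color=#007f00>".toList
    | l :: rest =>
      "<font color=#007f00>".toList ++ pvEscLine l ++
        (if rest == [] then []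
         else "</font>".toList ++ (rest.map (fun m => "<br><br>".toList ++ pvEscLine m)).flatten)
  let t2 := match u with
    | some us => if us.toList ≠ [] then PySem.Chars.replace t us.toList ("<b>".toList ++ us.toList ++ "</b>".toList) else t
    | none => t
  String.ofList t2

-- ===== PRECONDITION & SPEC =====
def Spec_Text2Html (s : String) (u : Option String) (out : String) : Prop := out = Text2Html_alt s u
instance (s : String) (u : Option String) (out : String) : Decidable (Spec_Text2Html s u out) := by unfold Spec_Text2Html; infer_instance

-- ===== CLAIM (what is proved, stated in full; the proofs are below) =====
def Claim_equal_Text2Html : Prop := ∀ (s : String) (u : Option String), Dom_Text2Html s u → Spec_Text2Html s u (Text2Html s u)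

-- ===== LEMMAS AND PROOFS =====

-- a character with code 10 is the newline character
theorem pvChar10 (c : Char) (h : c.toNat = 10) : c = '\n' := by
  cases c with
  | mk v hv =>
    apply Char.ext
    simp only [Char.toNat] at h
    exact UInt32.toNat_inj.mp (by simpa using h)

-- the pieces A appends for one non-newline character, and what they flatten to
def pvPieces (c : Char) : List (List Char) :=
  if c.toNat = 32 then ["&nbsp;".toList]
  else if c.toNat < 256 ∧ ¬(PySem.Chars.isalpha c = true ∨ PySem.Chars.isdigit c = true) then
    ["&#".toList, PySem.Int.toChars (c.toNat : Int), ";".toList]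
  else [[c]]

-- the text A emits after firstLine has become False
def pvMidStr : List Char → List Char
  | [] => []
  | c :: cs => (if c = '\n' then "<br><br>".toList else pvEscChar c) ++ pvMidStr cs

-- the text A emits while firstLine=True but something was already appended
def pvFirstStr : List Char → List Char
  | [] => []
  | c :: cs => if c = '\n' then "</font>".toList ++ "<br><br>".toList ++ pvMidStr cs
               else pvEscChar c ++ pvFirstStr cs

-- the text A emits from the initial state (leading newlines skipped)
def pvSkipStr : List Char → List Char
  | [] => []
  | c :: cs => if c = '\n' then pvSkipStr cs else pvEscChar c ++ pvFirstStr cs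

theorem pvStepA_ne (c : Char) (h : c.toNat ≠ 10) (ts : List (List Char)) (b : Bool) :
    pvStepA (ts, b) c = (ts ++ pvPieces c, b) := by
  simp only [pvStepA, pvPieces, h, if_false]
  split_ifs <;> rfl

theorem pvStepA_nl (ts : List (List Char)) (b : Bool) :
    pvStepA (ts, b) '\n' =
      if b = true then
        (if ts.length = 1 then (ts, b) else (ts ++ ["</font>".toList, "<br><br>".toList], false))
      else (ts ++ ["<br><br>".toList], b) := by
  simp [pvStepA]

theorem pvPieces_flatten (c : Char) : (pvPieces c).flatten = pvEscChar c := by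
  simp only [pvPieces, pvEscChar]
  split_ifs <;> simp

theorem pvPieces_ne_nil (c : Char) : pvPieces c ≠ [] := by
  simp only [pvPieces]; split_ifs <;> simp

theorem pvMid_spec (cs : List Char) : ∀ ts : List (List Char),
    (cs.foldl pvStepA (ts, false)).1.flatten = ts.flatten ++ pvMidStr cs := by
  induction cs with
  | nil => intro ts; simp [pvMidStr]
  | cons c cs ih =>
    intro ts
    by_cases hc : c = '\n'
    · subst hc
      simp only [List.foldl_cons, pvStepA_nl]
      rw [if_neg (by simp)]
      rw [ih]
      simp [pvMidStr]
    · have h : c.toNat ≠ 10 := fun hh => hc (pvChar10 c hh)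
      simp only [List.foldl_cons, pvStepA_ne c h]
      rw [ih]
      simp [pvMidStr, hc, pvPieces_flatten]

theorem pvFirst_spec (cs : List Char) : ∀ ts : List (List Char), 2 ≤ ts.length →
    (cs.foldl pvStepA (ts, true)).1.flatten = ts.flatten ++ pvFirstStr cs := by
  induction cs with
  | nil => intro ts _; simp [pvFirstStr]
  | cons c cs ih =>
    intro ts hts
    by_cases hc : c = '\n'
    · subst hc
      simp only [List.foldl_cons, pvStepA_nl, if_true]
      rw [if_neg (by omega)]
      rw [pvMid_spec]
      simp [pvFirstStr]
    · have h : c.toNat ≠ 10 := fun hh => hc (pvChar10 c hh)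
      simp only [List.foldl_cons, pvStepA_ne c h]
      rw [ih (ts ++ pvPieces c) (by
        have h1 : 0 < (pvPieces c).length := List.length_pos_iff.mpr (pvPieces_ne_nil c)
        simp only [List.length_append]; omega)]
      simp [pvFirstStr, hc, pvPieces_flatten]

theorem pvSkip_spec (cs : List Char) :
    (cs.foldl pvStepA (["<font color=#007f00>".toList], true)).1.flatten
      = "<font color=#007f00>".toList ++ pvSkipStr cs := by
  induction cs with
  | nil => simp [pvSkipStr]
  | cons c cs ih =>
    by_cases hc : c = '\n'
    · subst hc
      simp only [List.foldl_cons, pvStepA_nl, if_true]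
      rw [if_pos (by simp)]
      rw [ih]; simp [pvSkipStr]
    · have h : c.toNat ≠ 10 := fun hh => hc (pvChar10 c hh)
      simp only [List.foldl_cons, pvStepA_ne c h]
      rw [pvFirst_spec cs (["<font color=#007f00>".toList] ++ pvPieces c) (by
        have h1 : 0 < (pvPieces c).length := List.length_pos_iff.mpr (pvPieces_ne_nil c)
        simp only [List.length_append, List.length_cons, List.length_nil]; omega)]
      simp [pvSkipStr, hc, pvPieces_flatten]

theorem pvSplitNl_ne_nil (cs : List Char) : pvSplitNl cs ≠ [] := by
  cases cs with
  | nil => simp [pvSplitNl]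
  | cons c cs =>
    simp only [pvSplitNl]
    split_ifs
    · simp
    · cases h : pvSplitNl cs <;> simp

theorem pvMid_split (cs : List Char) :
    pvMidStr cs = pvEscLine ((pvSplitNl cs).headD []) ++
      (((pvSplitNl cs).tail).map (fun m => "<br><br>".toList ++ pvEscLine m)).flatten := by
  induction cs with
  | nil => simp [pvSplitNl, pvMidStr, pvEscLine]
  | cons c cs ih =>
    obtain ⟨l', rest', h'⟩ := List.exists_cons_of_ne_nil (pvSplitNl_ne_nil cs)
    rw [h'] at ih
    by_cases hc : c = '\n'
    · subst hc
      simp only [pvSplitNl, if_true, h', List.headD_cons, List.tail_cons,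
        List.map_cons, List.flatten_cons] at ih ⊢
      rw [show pvMidStr ('\n' :: cs) = "<br><br>".toList ++ pvMidStr cs from by simp [pvMidStr]]
      rw [ih]
      simp [pvEscLine]
    · simp only [pvSplitNl, if_neg hc, h', List.headD_cons, List.tail_cons] at ih ⊢
      rw [show pvMidStr (c :: cs) = pvEscChar c ++ pvMidStr cs from by simp [pvMidStr, hc]]
      rw [ih]
      simp [pvEscLine]

theorem pvFirst_split (cs : List Char) :
    pvFirstStr cs = pvEscLine ((pvSplitNl cs).headD []) ++
      (if (pvSplitNl cs).tail = [] then []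
       else "</font>".toList ++
         (((pvSplitNl cs).tail).map (fun m => "<br><br>".toList ++ pvEscLine m)).flatten) := by
  induction cs with
  | nil => simp [pvSplitNl, pvFirstStr, pvEscLine]
  | cons c cs ih =>
    obtain ⟨l', rest', h'⟩ := List.exists_cons_of_ne_nil (pvSplitNl_ne_nil cs)
    rw [h'] at ih
    by_cases hc : c = '\n'
    · subst hc
      simp only [pvSplitNl, if_true, h', List.headD_cons, List.tail_cons]
      rw [show pvFirstStr ('\n' :: cs) = "</font>".toList ++ "<br><br>".toList ++ pvMidStr cs
           from by simp [pvFirstStr]]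
      rw [pvMid_split cs, h']
      simp [pvEscLine]
    · simp only [pvSplitNl, if_neg hc, h', List.headD_cons, List.tail_cons] at ih ⊢
      rw [show pvFirstStr (c :: cs) = pvEscChar c ++ pvFirstStr cs from by simp [pvFirstStr, hc]]
      rw [ih]
      simp [pvEscLine]

theorem pvSkip_split (cs : List Char) :
    (match (pvSplitNl cs).dropWhile (fun l => l == []) with
      | [] => "<font color=#007f00>".toList
      | l :: rest =>
        "<font color=#007f00>".toList ++ pvEscLine l ++
          (if rest == [] then []
           else "</font>".toList ++ (rest.map (fun m => "<br><br>".toList ++ pvEscLine m)).flatten))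
    = "<font color=#007f00>".toList ++ pvSkipStr cs := by
  induction cs with
  | nil => simp [pvSplitNl, pvSkipStr, List.dropWhile]
  | cons c cs ih =>
    by_cases hc : c = '\n'
    · subst hc
      simp only [pvSplitNl, if_true]
      rw [show List.dropWhile (fun l => l == []) ([] :: pvSplitNl cs)
            = List.dropWhile (fun l => l == []) (pvSplitNl cs) from by simp [List.dropWhile]]
      rw [ih]
      simp [pvSkipStr]
    · obtain ⟨l', rest', h'⟩ := List.exists_cons_of_ne_nil (pvSplitNl_ne_nil cs)
      simp only [pvSplitNl, if_neg hc, h']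
      rw [show List.dropWhile (fun l => l == []) ((c :: l') :: rest')
            = (c :: l') :: rest' from by simp [List.dropWhile]]
      rw [show pvSkipStr (c :: cs) = pvEscChar c ++ pvFirstStr cs from by simp [pvSkipStr, hc]]
      rw [pvFirst_split cs, h']
      simp only [List.headD_cons, List.tail_cons]
      simp [pvEscLine]

-- ===== VERDICT (by name: the statement is the Claim_ definition above) =====
theorem Text2Html_spec : Claim_equal_Text2Html := by
  intro s u _
  unfold Spec_Text2Html
  simp only [Text2Html, Text2Html_alt, pvSkip_spec, pvSkip_split]
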